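-- pv_equiv track=rewrite | github.com/waxerman1000/gcode-cleaner | gcode_pore_inserter.py | get_int
-- ===== SOURCE A (Python) =====
-- def get_int(line_to_read):
--     '''gets an integer from a commented line of gcode'''
--     int_to_return = 0
--     past_words = False
--     for char in line_to_read:
--         if past_words == True:
--             try:
--                 char = int(char)
--
--                 int_to_return = int_to_return * 10
--                 int_to_return += int(char)
--             except ValueError:
--                 pass
--         if char == ':':
--             past_words = True
--     return int_to_return
-- ===== SOURCE B (Python) =====
-- def get_int(line_to_read):
--     '''gets an integer from a commented line of gcode'''
--     idx = line_to_read.find(':')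
--     if idx == -1:
--         return 0
--     digits = [ord(c) - 48 for c in line_to_read[idx + 1:] if c.isdecimal()]
--     return sum(d * 10 ** i for i, d in enumerate(reversed(digits)))
-- ===== Notes on version B (the rewrite author's own statement) =====
-- stated objective: simpler
-- what changed: A's single flag-driven pass with try/except-per-character Horner accumulation is replaced by locate the first colon with str.find, slice off the tail, filter the decimal digits, and sum digit*10**position over the reversed digit list; a timing run measured B faster (no per-character exception handling).
import Mathlib
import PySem

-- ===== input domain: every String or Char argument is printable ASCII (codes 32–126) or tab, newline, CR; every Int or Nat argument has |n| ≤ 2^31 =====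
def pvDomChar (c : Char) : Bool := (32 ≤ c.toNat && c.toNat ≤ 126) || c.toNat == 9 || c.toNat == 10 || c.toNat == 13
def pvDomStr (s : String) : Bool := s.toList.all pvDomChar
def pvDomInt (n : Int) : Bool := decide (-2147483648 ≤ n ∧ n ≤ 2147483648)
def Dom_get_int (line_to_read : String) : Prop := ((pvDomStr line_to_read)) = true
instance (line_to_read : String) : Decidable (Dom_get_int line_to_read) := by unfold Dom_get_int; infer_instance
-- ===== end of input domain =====

-- B replaces A's flag-driven per-character accumulator (try/except filtering) by locate-colon →
-- slice → filter-digits → positional power-of-ten sum; objective: simpler decomposition, no speed claim.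

-- ===== PORT A =====
-- int(char) on a single character: accepts exactly one decimal digit; hand port, exact on
-- printable-ASCII/tab/newline chars (matches PySem.Int.ofChars? [c] there), returns none = ValueError.
def pyIntChar? (c : Char) : Option Int :=
  if PySem.Chars.isdigit c then some ((c.toNat : Int) - 48) else none

-- one iteration of A's for-loop; state = (int_to_return, past_words).
-- After 'char = int(char)' succeeds, past_words is already True, so A's 'char == ':'' test
-- (an int-vs-str comparison, always False) cannot change the flag: 'st1.2 || char == ':'' is exact.
def getIntStep (st : Int × Bool) (char : Char) : Int × Bool :=
  let st1 := if st.2 then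
      match pyIntChar? char with
      | some d => (st.1 * 10 + d, st.2)
      | none => st
    else st
  (st1.1, st1.2 || decide (char = ':'))

def get_int (line_to_read : String) : Int :=
  (line_to_read.toList.foldl getIntStep (0, false)).1

-- ===== PORT B =====
-- c.isdecimal() ported as PySem.Chars.isdigit: on the printable-ASCII domain both mean '0' ≤ c ≤ '9'.
-- 10 ** i : the enumerate index i is a nonnegative Int; 10 ^ i.toNat is exact for it.
def get_int_alt (line_to_read : String) : Int :=
  let idx := PySem.Str.find line_to_read ":"
  if idx = -1 then 0
  else
    let digits := ((PySem.Str.slice line_to_read (some (idx + 1)) none).toList.filter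
        PySem.Chars.isdigit).map (fun c => (c.toNat : Int) - 48)
    ((PySem.List.enumerate digits.reverse 0).map (fun p => p.2 * 10 ^ p.1.toNat)).sum

-- ===== PRECONDITION & SPEC =====
def Spec_get_int (line_to_read : String) (out : Int) : Prop := out = get_int_alt line_to_read
instance (line_to_read : String) (out : Int) : Decidable (Spec_get_int line_to_read out) := by unfold Spec_get_int; infer_instance

-- ===== CLAIM (what is proved, stated in full; the proofs are below) =====
def Claim_equal_get_int : Prop := ∀ (line_to_read : String), Dom_get_int line_to_read → Spec_get_int line_to_read (get_int line_to_read)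

-- ===== LEMMAS AND PROOFS =====

-- digit values (as Ints) of a character list, in order
def pvVals (cs : List Char) : List Int :=
  (cs.filter PySem.Chars.isdigit).map (fun c => (c.toNat : Int) - 48)

-- B's positional sum of a big-endian digit-value list
def pvSumVal (ds : List Int) : Int :=
  ((PySem.List.enumerate ds.reverse 0).map (fun p => p.2 * 10 ^ p.1.toNat)).sum

theorem pvSumVal_nil : pvSumVal [] = 0 := rfl

theorem pvSumVal_cons (d : Int) (ds : List Int) :
    pvSumVal (d :: ds) = d * 10 ^ ds.length + pvSumVal ds := by
  simp [pvSumVal, PySem.List.enumerate_append, PySem.List.enumerate_cons, PySem.List.enumerate_nil]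
  ring

theorem pvHorner_eq_sum (ds : List Int) (a : Int) :
    List.foldl (fun a d => a * 10 + d) a ds = a * 10 ^ ds.length + pvSumVal ds := by
  induction ds generalizing a with
  | nil => simp [pvSumVal_nil]
  | cons d ds ih =>
    simp only [List.foldl_cons, ih, pvSumVal_cons, List.length_cons]
    ring

theorem pvFoldl_true (cs : List Char) (acc : Int) :
    List.foldl getIntStep (acc, true) cs =
      (List.foldl (fun a d => a * 10 + d) acc (pvVals cs), true) := by
  induction cs generalizing acc with
  | nil => simp [pvVals]
  | cons c cs ih =>
    by_cases h : PySem.Chars.isdigit c = true <;>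
      simp [getIntStep, pyIntChar?, h, ih, pvVals]

theorem pvFoldl_false (cs : List Char) (h : ':' ∉ cs) :
    List.foldl getIntStep (0, false) cs = (0, false) := by
  induction cs with
  | nil => rfl
  | cons c cs ih =>
    simp only [List.mem_cons, not_or] at h
    have hc : c ≠ ':' := fun e => h.1 e.symm
    simp [getIntStep, hc, ih h.2]

theorem pvSplit_colon (cs : List Char) (h : ':' ∈ cs) :
    ∃ pre rest, cs = pre ++ ':' :: rest ∧ ':' ∉ pre := by
  induction cs with
  | nil => cases h
  | cons c cs ih =>
    by_cases hc : c = ':'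
    · exact ⟨[], cs, by simp [hc], by simp⟩
    · have h' : ':' ∈ cs := by
        rcases List.mem_cons.mp h with h | h
        · exact absurd h.symm hc
        · exact h
      obtain ⟨pre, rest, h1, h2⟩ := ih h'
      refine ⟨c :: pre, rest, by simp [h1], ?_⟩
      simp only [List.mem_cons, not_or]
      exact ⟨fun e => hc e.symm, h2⟩

theorem pvSingleton_infix_iff (a : Char) (l : List Char) : [a] <:+: l ↔ a ∈ l := by
  constructor
  · intro h; exact h.subset (by simp)
  · intro h
    obtain ⟨s, t, hst⟩ := List.append_of_mem h
    exact ⟨s, t, by simp [hst]⟩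

theorem pvSingleton_prefix_iff (a : Char) (l : List Char) : [a] <+: l ↔ l.head? = some a := by
  cases l with
  | nil => simp
  | cons b bs => simp [List.cons_prefix_cons, eq_comm]

theorem pvFind_split (pre rest : List Char) (hpre : ':' ∉ pre) :
    PySem.Chars.find (pre ++ ':' :: rest) [':'] = (pre.length : Int) := by
  set l := pre ++ ':' :: rest with hl
  have hmem : ':' ∈ l := by simp [hl]
  have hinf : [':'] <:+: l := (pvSingleton_infix_iff ':' l).mpr hmem
  have hnn : 0 ≤ PySem.Chars.find l [':'] := (PySem.Chars.find_nonneg_iff l [':']).mpr hinf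
  obtain ⟨hpref, hmin⟩ := PySem.Chars.find_spec hnn
  set n := (PySem.Chars.find l [':']).toNat with hn
  have hat : l[n]? = some ':' := by
    have := (pvSingleton_prefix_iff ':' (l.drop n)).mp hpref
    simpa [List.head?_drop] using this
  have hle : ¬ n < pre.length := by
    intro hlt
    have hget : l[n]? = some pre[n] := by
      rw [hl, List.getElem?_append_left hlt]
      exact List.getElem?_eq_getElem hlt
    rw [hget] at hat
    have hcolon : pre[n] = ':' := Option.some.inj hat
    exact hpre (hcolon ▸ List.getElem_mem hlt)
  have hge : ¬ pre.length < n := by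
    intro hlt
    apply hmin pre.length hlt
    rw [pvSingleton_prefix_iff, List.head?_drop, hl, List.getElem?_append_right le_rfl]
    simp
  have : n = pre.length := by omega
  omega

theorem get_int_eq_alt (line_to_read : String) :
    get_int line_to_read = get_int_alt line_to_read := by
  set cs := line_to_read.toList with hcs
  by_cases hmem : ':' ∈ cs
  · obtain ⟨pre, rest, hsplit, hpre⟩ := pvSplit_colon cs hmem
    have hfind : PySem.Str.find line_to_read ":" = (pre.length : Int) := by
      have : (":" : String).toList = [':'] := rfl
      rw [PySem.Str.find_eq, this, ← hcs, hsplit]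
      exact pvFind_split pre rest hpre
    have hslice : (PySem.Str.slice line_to_read (some ((pre.length : Int) + 1)) none).toList = rest := by
      have h1 : ((pre.length : Int) + 1) = ((pre.length + 1 : Nat) : Int) := by push_cast; ring
      rw [PySem.Str.toList_slice, PySem.Chars.slice_eq_listSlice, h1, PySem.List.slice_from_natCast, ← hcs, hsplit]
      rw [show pre.length + 1 = pre.length + 1 from rfl, ← List.singleton_append, ← List.append_assoc]
      simp
    have hA : get_int line_to_read =
        List.foldl (fun a d => a * 10 + d) 0 (pvVals rest) := by
      unfold get_int
      rw [← hcs, hsplit, List.foldl_append, pvFoldl_false pre hpre]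
      have hstep : getIntStep (0, false) ':' = (0, true) := by
        simp [getIntStep]
      simp only [List.foldl_cons, hstep, pvFoldl_true]
    have hB : get_int_alt line_to_read = pvSumVal (pvVals rest) := by
      unfold get_int_alt
      rw [hfind]
      have hne : ((pre.length : Int)) ≠ -1 := by
        intro h; omega
      simp only [hne, if_false, hslice]
      rfl
    rw [hA, hB, pvHorner_eq_sum]
    simp
  · have hfind : PySem.Str.find line_to_read ":" = -1 := by
      rw [PySem.Str.find_eq]
      apply (PySem.Chars.find_eq_neg_one_iff _ _).mpr
      intro h
      exact hmem ((pvSingleton_infix_iff ':' cs).mp (by simpa using h))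
    have hA : get_int line_to_read = 0 := by
      unfold get_int
      rw [← hcs, pvFoldl_false cs hmem]
    rw [hA]
    unfold get_int_alt
    rw [hfind]
    simp

-- ===== VERDICT (by name: the statement is the Claim_ definition above) =====
theorem get_int_spec : Claim_equal_get_int := by
  intro line _
  unfold Spec_get_int
  exact get_int_eq_alt line
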